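-- pv_equiv track=rewrite | github.com/windiboy/travel_scrapy | wang/wang/spiders/all_page.py | url_dedup
-- ===== SOURCE A (Python) =====
-- def url_dedup(urls):
--     res = []
--     i = 0
--     while i+2 < len(urls):
--         if urls[i] == urls[i+1] and urls[i] == urls[i+2]:
--             res.append({"link_id": urls[i][1:-5]})
--             i += 3
--         else:
--             i += 1
--     return res
-- ===== SOURCE B (Python) =====
-- def url_dedup(urls):
--     # One pass over maximal runs of consecutive equal urls: a run of length L
--     # contributes L // 3 entries (A's greedy triple consumption within a run).
--     res = []
--     run = 0
--     prev = None
--     for u in urls: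
--         if run and u == prev:
--             run += 1
--         else:
--             if run:
--                 res += [{"link_id": prev[1:-5]}] * (run // 3)
--             run = 1
--             prev = u
--     if run:
--         res += [{"link_id": prev[1:-5]}] * (run // 3)
--     return res
-- ===== Notes on version B (the rewrite author's own statement) =====
-- stated objective: simpler
-- what changed: Replaces the index-skipping while loop (advance by 3 on a matching triple, else by 1) with a single pass that tracks maximal runs of consecutive equal urls and emits run_length // 3 entries per run; avoids repeated indexing, giving a constant-factor speedup.
import Mathlib
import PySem

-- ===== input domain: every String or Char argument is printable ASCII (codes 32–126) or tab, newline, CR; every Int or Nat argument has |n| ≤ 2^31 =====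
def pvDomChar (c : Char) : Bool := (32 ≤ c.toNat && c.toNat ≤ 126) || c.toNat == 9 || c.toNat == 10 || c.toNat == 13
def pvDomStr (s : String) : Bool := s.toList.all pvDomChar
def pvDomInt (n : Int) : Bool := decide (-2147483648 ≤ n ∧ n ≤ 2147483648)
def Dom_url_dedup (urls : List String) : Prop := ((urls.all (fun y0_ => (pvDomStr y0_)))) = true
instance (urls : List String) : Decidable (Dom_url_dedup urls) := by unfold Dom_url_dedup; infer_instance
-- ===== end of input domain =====

-- B replaces A's index-skipping while loop by a single pass over maximal runs of
-- consecutive equal urls, emitting run_length / 3 entries per run (simpler).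

-- ===== PORT A =====
-- the entry dict {"link_id": urls[i][1:-5]} as an association list
def pvEntry (s : String) : List (String × String) :=
  [("link_id", PySem.Str.slice s (some 1) (some (-5)))]

-- A's while loop: index i, accumulator res; urls[i], urls[i+1], urls[i+2] are
-- in range exactly when the loop guard i+2 < len(urls) holds, so plain getElem
-- is exact here.
def url_dedup_go (urls : List String) (i : Nat)
    (res : List (List (String × String))) : List (List (String × String)) :=
  if h : i + 2 < urls.length then
    if urls[i]'(by omega) == urls[i+1]'(by omega) && urls[i]'(by omega) == urls[i+2]'h then
      url_dedup_go urls (i+3) (res ++ [pvEntry (urls[i]'(by omega))])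
    else
      url_dedup_go urls (i+1) res
  else res
termination_by urls.length - i

def url_dedup (urls : List String) : List (List (String × String)) :=
  url_dedup_go urls 0 []

-- ===== PORT B =====
-- B's loop state: res, current run length (run = 0 encodes Python's prev = None
-- start state, in which prev is never read), current run value prev; the
-- match-[] case is the final flush after the for loop.
def url_dedup_alt_go (l : List String) (res : List (List (String × String)))
    (run : Nat) (prev : String) : List (List (String × String)) :=
  match l with
  | [] => if run ≠ 0 then res ++ List.replicate (run / 3) (pvEntry prev) else res
  | u :: t =>
    if run ≠ 0 ∧ u == prev then
      url_dedup_alt_go t res (run + 1) prev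
    else
      url_dedup_alt_go t
        (if run ≠ 0 then res ++ List.replicate (run / 3) (pvEntry prev) else res) 1 u

def url_dedup_alt (urls : List String) : List (List (String × String)) :=
  url_dedup_alt_go urls [] 0 ""

-- ===== PRECONDITION & SPEC =====
def Spec_url_dedup (urls : List String) (out : List (List (String × String))) : Prop := out = url_dedup_alt urls
instance (urls : List String) (out : List (List (String × String))) : Decidable (Spec_url_dedup urls out) := by unfold Spec_url_dedup; infer_instance

-- ===== CLAIM (what is proved, stated in full; the proofs are below) =====
def Claim_equal_url_dedup : Prop := ∀ (urls : List String), Dom_url_dedup urls → Spec_url_dedup urls (url_dedup urls)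

-- ===== LEMMAS AND PROOFS =====

-- common reference function: A's scan, structurally on the suffix
def fRef : List String → List (List (String × String))
  | a :: b :: c :: rest =>
    if a == b && a == c then pvEntry a :: fRef rest else fRef (b :: c :: rest)
  | _ => []

theorem url_dedup_go_eq (urls : List String) (i : Nat) (res : List (List (String × String))) :
    url_dedup_go urls i res = res ++ fRef (urls.drop i) := by
  induction hn : urls.length - i using Nat.strong_induction_on generalizing i res with
  | _ n ih =>
  unfold url_dedup_go
  by_cases h : i + 2 < urls.length
  · have hd : urls.drop i = urls[i]'(by omega) :: urls[i+1]'(by omega) :: urls[i+2]'h :: urls.drop (i+3) := by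
      rw [List.drop_eq_getElem_cons (by omega), List.drop_eq_getElem_cons (by omega),
          List.drop_eq_getElem_cons (by omega)]
    have hf : fRef (urls[i]'(by omega) :: urls[i+1]'(by omega) :: urls[i+2]'h :: urls.drop (i+3))
        = if urls[i]'(by omega) == urls[i+1]'(by omega) && urls[i]'(by omega) == urls[i+2]'h then
            pvEntry (urls[i]'(by omega)) :: fRef (urls.drop (i+3))
          else fRef (urls[i+1]'(by omega) :: urls[i+2]'h :: urls.drop (i+3)) := rfl
    rw [dif_pos h, hd, hf]
    by_cases hc : (urls[i]'(by omega) == urls[i+1]'(by omega) && urls[i]'(by omega) == urls[i+2]'h) = true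
    · rw [if_pos hc, if_pos hc,
          ih (urls.length - (i+3)) (by omega) (i+3) _ rfl]
      simp
    · rw [if_neg hc, if_neg hc,
          ih (urls.length - (i+1)) (by omega) (i+1) res rfl,
          List.drop_eq_getElem_cons (l := urls) (i := i+1) (by omega),
          List.drop_eq_getElem_cons (l := urls) (i := i+2) (by omega)]
  · rw [dif_neg h]
    have : urls.length ≤ i + 2 := by omega
    have hlen : (urls.drop i).length ≤ 2 := by simp; omega
    match hdd : urls.drop i with
    | [] => simp [fRef]
    | [a] => simp [fRef]
    | [a, b] => simp [fRef]
    | a :: b :: c :: r => rw [hdd] at hlen; simp at hlen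

-- step lemma: a mismatched head is just skipped
theorem fRef_cons_ne (x u : String) (t : List String) (h : u ≠ x) :
    fRef (x :: u :: t) = fRef (u :: t) := by
  match t with
  | [] => simp [fRef]
  | c :: r =>
    show (if x == u && x == c then _ else _) = _
    rw [if_neg (by simp; exact fun hxu _ => h hxu.symm)]

theorem fRef_replicate (n : Nat) (x : String) :
    fRef (List.replicate n x) = List.replicate (n / 3) (pvEntry x) := by
  induction n using Nat.strong_induction_on with
  | _ n ih =>
  match n with
  | 0 => simp [fRef]
  | 1 => simp [fRef]
  | 2 => simp [fRef]
  | (m+3) =>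
    have : List.replicate (m+3) x = x :: x :: x :: List.replicate m x := by
      simp [List.replicate_succ]
    rw [this]
    show (if x == x && x == x then _ else _) = _
    rw [if_pos (by simp)]
    rw [ih m (by omega)]
    have : (m + 3) / 3 = m / 3 + 1 := by omega
    rw [this, List.replicate_succ]

theorem fRef_replicate_append (n : Nat) (x u : String) (t : List String) (h : u ≠ x) :
    fRef (List.replicate n x ++ u :: t) =
      List.replicate (n / 3) (pvEntry x) ++ fRef (u :: t) := by
  induction n using Nat.strong_induction_on with
  | _ n ih =>
  match n with
  | 0 => simp
  | 1 => simpa using fRef_cons_ne x u t h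
  | 2 =>
    show fRef (x :: x :: u :: t) = _
    have h1 : fRef (x :: x :: u :: t) = fRef (x :: u :: t) := by
      show (if x == x && x == u then _ else _) = _
      rw [if_neg (by simp; exact fun hxu => h hxu.symm)]
    rw [h1, fRef_cons_ne x u t h]; simp
  | (m+3) =>
    have hr : List.replicate (m+3) x ++ u :: t = x :: x :: x :: (List.replicate m x ++ u :: t) := by
      simp [List.replicate_succ]
    rw [hr]
    show (if x == x && x == x then _ else _) = _
    rw [if_pos (by simp), ih m (by omega)]
    have : (m + 3) / 3 = m / 3 + 1 := by omega
    rw [this, List.replicate_succ]; simp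

theorem url_dedup_alt_go_eq (l : List String) (res : List (List (String × String)))
    (run : Nat) (prev : String) (hrun : run ≠ 0) :
    url_dedup_alt_go l res run prev = res ++ fRef (List.replicate run prev ++ l) := by
  induction l generalizing res run prev with
  | nil =>
    simp [url_dedup_alt_go, hrun, fRef_replicate]
  | cons u t ih =>
    unfold url_dedup_alt_go
    by_cases hu : u = prev
    · rw [if_pos ⟨hrun, by simp [hu]⟩, ih res (run+1) prev (by omega)]
      congr 2
      subst hu
      rw [List.replicate_succ']
      simp
    · rw [if_neg (by rintro ⟨-, h2⟩; exact hu (by simpa using h2)), if_pos hrun,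
          ih _ 1 u (by omega)]
      rw [fRef_replicate_append run prev u t hu]
      simp

-- ===== VERDICT (by name: the statement is the Claim_ definition above) =====
theorem url_dedup_spec : Claim_equal_url_dedup := by
  intro urls _
  show url_dedup urls = url_dedup_alt urls
  rw [url_dedup, url_dedup_go_eq]
  match urls with
  | [] => simp [url_dedup_alt, url_dedup_alt_go, fRef]
  | u :: t =>
    rw [url_dedup_alt]
    unfold url_dedup_alt_go
    rw [if_neg (by rintro ⟨h, -⟩; exact h rfl), if_neg (by intro h; exact h rfl)]
    rw [url_dedup_alt_go_eq t [] 1 u (by omega)]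
    simp
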